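-- pv_equiv track=rewrite | github.com/ilyi1116/auto-video-generation-fold6 | backup_20250804_132502/services/admin-service/behavior/pattern.py | _find_frequent_sequences
-- ===== SOURCE A (Python) =====
-- from typing import Dict, Any, List, Optional, Tuple
-- from collections import defaultdict, Counter
--
-- def _find_frequent_sequences(sequences: List[List[str]], min_support: int) -> Dict[Tuple[str, ...], int]:
--     """查找頻繁序列"""
--     pattern_counts = defaultdict(int)
--
--     # 生成所有可能的子序列
--     for sequence in sequences:
--         for length in range(2, len(sequence) + 1):
--             for start in range(len(sequence) - length + 1):
--                 subseq = tuple(sequence[start:start + length])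
--                 pattern_counts[subseq] += 1
--
--     # 過濾低頻模式
--     frequent_patterns = {
--         pattern: count for pattern, count in pattern_counts.items()
--         if count >= min_support
--     }
--
--     return frequent_patterns
-- ===== SOURCE B (Python) =====
-- def _find_frequent_sequences(sequences, min_support):
--     """Incremental window extension: grow each level's windows from the
--     previous level by appending the next symbol (no slicing, no index ranges)."""
--     counts = {}
--     for seq in sequences:
--         windows = [(s,) for s in seq]          # length-1 windows, starts 0..n-1
--         for tail in range(1, len(seq)):
--             windows = [w + (x,) for w, x in zip(windows, seq[tail:])]
--             for w in windows:
--                 counts[w] = counts.get(w, 0) + 1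
--     return {p: c for p, c in counts.items() if c >= min_support}
-- ===== Notes on version B (the rewrite author's own statement) =====
-- stated objective: alternative
-- what changed: Replaces the triple-nested slice enumeration (for each length, re-slice every window from scratch) by level-wise incremental window extension: each level's windows are built from the previous level by zipping with the shifted sequence and appending one symbol, counting as levels are produced.
import Mathlib
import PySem

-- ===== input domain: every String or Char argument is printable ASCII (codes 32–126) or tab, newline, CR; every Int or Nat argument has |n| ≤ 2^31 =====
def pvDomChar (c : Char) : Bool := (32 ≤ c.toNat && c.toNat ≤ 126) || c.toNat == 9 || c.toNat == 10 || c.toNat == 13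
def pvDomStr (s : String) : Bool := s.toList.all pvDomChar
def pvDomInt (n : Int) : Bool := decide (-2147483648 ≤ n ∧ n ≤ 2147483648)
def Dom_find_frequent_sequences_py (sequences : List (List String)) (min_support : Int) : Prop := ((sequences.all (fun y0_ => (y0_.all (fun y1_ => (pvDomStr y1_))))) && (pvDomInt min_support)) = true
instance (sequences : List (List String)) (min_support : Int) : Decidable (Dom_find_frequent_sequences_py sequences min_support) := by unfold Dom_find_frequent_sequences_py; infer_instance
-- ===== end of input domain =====

-- B replaces A's triple-nested slice enumeration by level-wise incremental window
-- extension (zip-and-append); same results, an alternative decomposition (no speed claim).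

-- ===== PORT A =====
-- A: defaultdict counting of every contiguous subsequence sequence[start:start+length],
-- for length = 2 .. len(sequence), then a dict comprehension keeping count >= min_support.
def find_frequent_sequences_py (sequences : List (List String)) (min_support : Int) : List (List String × Int) :=
  let pattern_counts : PySem.Dict (List String) Int :=
    sequences.foldl (fun d sequence =>
      (PySem.List.pyRange 2 ((sequence.length : Int) + 1) 1).foldl (fun d length_ =>
        (PySem.List.pyRange 0 ((sequence.length : Int) - length_ + 1) 1).foldl (fun d start =>
          d.modify (PySem.List.slice sequence (some start) (some (start + length_))) 0 (· + 1)) d) d)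
      PySem.Dict.empty
  (pattern_counts.items.foldl
    (fun d p => if p.2 ≥ min_support then d.insert p.1 p.2 else d)
    (PySem.Dict.empty : PySem.Dict (List String) Int)).items

-- ===== PORT B =====
-- B: per sequence, start from the length-1 windows and, for tail = 1 .. len(seq)-1,
-- extend each window by one symbol via zip(windows, seq[tail:]), counting each level.
def find_frequent_sequences_py_alt (sequences : List (List String)) (min_support : Int) : List (List String × Int) :=
  let counts : PySem.Dict (List String) Int :=
    sequences.foldl (fun d seq =>
      ((PySem.List.pyRange 1 (seq.length : Int) 1).foldl
        (fun (st : List (List String) × PySem.Dict (List String) Int) tail =>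
          let windows := (st.1.zip (PySem.List.slice seq (some tail) none)).map (fun p => p.1 ++ [p.2])
          (windows, windows.foldl (fun d w => d.insert w (d.getD w 0 + 1)) st.2))
        (seq.map (fun s => [s]), d)).2)
      PySem.Dict.empty
  (counts.items.foldl
    (fun d p => if p.2 ≥ min_support then d.insert p.1 p.2 else d)
    (PySem.Dict.empty : PySem.Dict (List String) Int)).items

-- ===== PRECONDITION & SPEC =====
def Spec_find_frequent_sequences_py (sequences : List (List String)) (min_support : Int) (out : List (List String × Int)) : Prop := out = find_frequent_sequences_py_alt sequences min_support
instance (sequences : List (List String)) (min_support : Int) (out : List (List String × Int)) : Decidable (Spec_find_frequent_sequences_py sequences min_support out) := by unfold Spec_find_frequent_sequences_py; infer_instance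

-- ===== CLAIM (what is proved, stated in full; the proofs are below) =====
def Claim_equal_find_frequent_sequences_py : Prop := ∀ (sequences : List (List String)) (min_support : Int), Dom_find_frequent_sequences_py sequences min_support → Spec_find_frequent_sequences_py sequences min_support (find_frequent_sequences_py sequences min_support)

-- ===== LEMMAS AND PROOFS =====

-- the contiguous windows of length k of seq, in start order
def pvWins (seq : List String) (k : Nat) : List (List String) :=
  (List.range (seq.length + 1 - k)).map (fun i => (seq.drop i).take k)

theorem pvWins_one (seq : List String) : pvWins seq 1 = seq.map (fun s => [s]) := by
  apply List.ext_getElem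
  · simp [pvWins]
  · intro i h1 h2
    simp only [pvWins, List.getElem_map, List.getElem_range]
    rw [List.take_add_one]
    simp [List.getElem?_drop]

theorem pvWins_succ (seq : List String) (k : Nat) :
    ((pvWins seq k).zip (seq.drop k)).map (fun p => p.1 ++ [p.2]) = pvWins seq (k + 1) := by
  apply List.ext_getElem
  · simp [pvWins]; omega
  · intro i h1 h2
    simp only [pvWins, List.getElem_map, List.getElem_zip, List.getElem_range,
      List.getElem_drop]
    have hik : i + k < seq.length := by
      simp [pvWins] at h2; omega
    rw [List.take_add_one]
    rw [List.getElem?_drop, List.getElem?_eq_getElem (by omega)]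
    simp [Nat.add_comm]

-- step functions: A counts with defaultdict-modify, B with insert/get — definitionally equal
theorem pvStep_eq :
    (fun (d : PySem.Dict (List String) Int) (w : List String) => d.modify w 0 (· + 1))
      = fun d w => d.insert w (d.getD w 0 + 1) := rfl

-- B's per-sequence loop invariant, for every number of completed iterations t
theorem pvB_loop (seq : List String) (d : PySem.Dict (List String) Int) (t : Nat) :
    (List.range t).foldl
      (fun (st : List (List String) × PySem.Dict (List String) Int) (j : Nat) =>
        let windows := (st.1.zip (PySem.List.slice seq (some ((1 : Int) + j)) none)).map
          (fun p => p.1 ++ [p.2])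
        (windows, windows.foldl (fun d w => d.insert w (d.getD w 0 + 1)) st.2))
      (seq.map (fun s => [s]), d)
    = (pvWins seq (t + 1),
       ((List.range t).flatMap (fun j => pvWins seq (j + 2))).foldl
         (fun d w => d.insert w (d.getD w 0 + 1)) d) := by
  induction t with
  | zero => simp [pvWins_one]
  | succ t ih =>
    rw [List.range_succ, List.foldl_append, ih]
    simp only [List.foldl_cons, List.foldl_nil, List.flatMap_append, List.flatMap_cons,
      List.flatMap_nil, List.append_nil, List.foldl_append]
    have hcast : (1 : Int) + (t : Nat) = ((t + 1 : Nat) : Int) := by push_cast; ring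
    rw [hcast, PySem.List.slice_from_natCast, pvWins_succ]

-- B's per-sequence step equals a fold of the level stream
theorem pvB_seq (seq : List String) (d : PySem.Dict (List String) Int) :
    ((PySem.List.pyRange 1 (seq.length : Int) 1).foldl
      (fun (st : List (List String) × PySem.Dict (List String) Int) tail =>
        let windows := (st.1.zip (PySem.List.slice seq (some tail) none)).map (fun p => p.1 ++ [p.2])
        (windows, windows.foldl (fun d w => d.insert w (d.getD w 0 + 1)) st.2))
      (seq.map (fun s => [s]), d)).2
    = ((List.range (seq.length - 1)).flatMap (fun j => pvWins seq (j + 2))).foldl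
        (fun d w => d.insert w (d.getD w 0 + 1)) d := by
  rw [PySem.List.pyRange_one, List.foldl_map]
  have hn : ((seq.length : Int) - 1).toNat = seq.length - 1 := by omega
  rw [hn, pvB_loop]

-- A's inner (start) loop over one length equals a fold of that level's windows
theorem pvA_inner (seq : List String) (k : Nat) (d : PySem.Dict (List String) Int) :
    (PySem.List.pyRange 0 ((seq.length : Int) - (2 + (k : Nat)) + 1) 1).foldl
      (fun d start =>
        d.modify (PySem.List.slice seq (some start) (some (start + (2 + (k : Nat))))) 0 (· + 1)) d
    = (pvWins seq (k + 2)).foldl (fun d w => d.modify w 0 (· + 1)) d := by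
  rw [PySem.List.pyRange_one, List.foldl_map, pvWins]
  have hm : ((seq.length : Int) - (2 + (k : Nat)) + 1 - 0).toNat = seq.length + 1 - (k + 2) := by
    omega
  rw [hm, List.foldl_map]
  apply PySem.List.foldl_congr_mem
  intro d' j hj
  have hc1 : (0 : Int) + (j : Nat) = ((j : Nat) : Int) := by ring
  have hc2 : ((j : Nat) : Int) + (2 + (k : Nat)) = ((j : Nat) : Int) + ((k + 2 : Nat) : Int) := by
    push_cast; ring
  rw [hc1, hc2, PySem.List.slice_natCast_add]

-- A's per-sequence step equals a fold of the same level stream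
theorem pvA_seq (seq : List String) (d : PySem.Dict (List String) Int) :
    (PySem.List.pyRange 2 ((seq.length : Int) + 1) 1).foldl (fun d length_ =>
      (PySem.List.pyRange 0 ((seq.length : Int) - length_ + 1) 1).foldl (fun d start =>
        d.modify (PySem.List.slice seq (some start) (some (start + length_))) 0 (· + 1)) d) d
    = ((List.range (seq.length - 1)).flatMap (fun j => pvWins seq (j + 2))).foldl
        (fun d w => d.modify w 0 (· + 1)) d := by
  rw [List.foldl_flatMap, PySem.List.pyRange_one, List.foldl_map]
  have hn : ((seq.length : Int) + 1 - 2).toNat = seq.length - 1 := by omega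
  rw [hn]
  apply PySem.List.foldl_congr_mem
  intro d' k hk
  have hc : (2 : Int) + (k : Nat) = ((2 + (k : Nat) : Int)) := by ring
  rw [hc, pvA_inner seq k d']

-- the two counting dicts are equal
theorem pvCounts_eq (sequences : List (List String)) :
    sequences.foldl (fun d sequence =>
      (PySem.List.pyRange 2 ((sequence.length : Int) + 1) 1).foldl (fun d length_ =>
        (PySem.List.pyRange 0 ((sequence.length : Int) - length_ + 1) 1).foldl (fun d start =>
          d.modify (PySem.List.slice sequence (some start) (some (start + length_))) 0 (· + 1)) d) d)
      PySem.Dict.empty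
    = sequences.foldl (fun d seq =>
        ((PySem.List.pyRange 1 (seq.length : Int) 1).foldl
          (fun (st : List (List String) × PySem.Dict (List String) Int) tail =>
            let windows := (st.1.zip (PySem.List.slice seq (some tail) none)).map (fun p => p.1 ++ [p.2])
            (windows, windows.foldl (fun d w => d.insert w (d.getD w 0 + 1)) st.2))
          (seq.map (fun s => [s]), d)).2)
        PySem.Dict.empty := by
  apply PySem.List.foldl_congr_mem
  intro d seq _
  rw [pvA_seq, pvB_seq, pvStep_eq]

-- ===== VERDICT (by name: the statement is the Claim_ definition above) =====
theorem find_frequent_sequences_py_spec : Claim_equal_find_frequent_sequences_py := by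
  intro sequences min_support _
  unfold Spec_find_frequent_sequences_py find_frequent_sequences_py find_frequent_sequences_py_alt
  rw [pvCounts_eq]
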